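-- pv_equiv track=rewrite | github.com/HHasanoglu/PythonExcercises | Sorting/Functions.py | linear_search_recursive
-- ===== SOURCE A (Python) =====
-- def linear_search_recursive(my_list, key):
--     s = len(my_list)-1
--     if s < 0:
--         return -1
--     if my_list[s] == key:
--         return s
--     else:
--         return linear_search_recursive(my_list[:-1], key)
-- ===== SOURCE B (Python) =====
-- def linear_search_recursive(my_list, key):
--     result = -1
--     for i, x in enumerate(my_list):
--         if x == key:
--             result = i
--     return result
-- ===== Notes on version B (the rewrite author's own statement) =====
-- stated objective: faster
-- what changed: Replaced back-to-front slice recursion (which copies the list on every step) with a single forward enumerate loop keeping the last matching index in an accumulator.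
import Mathlib
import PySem

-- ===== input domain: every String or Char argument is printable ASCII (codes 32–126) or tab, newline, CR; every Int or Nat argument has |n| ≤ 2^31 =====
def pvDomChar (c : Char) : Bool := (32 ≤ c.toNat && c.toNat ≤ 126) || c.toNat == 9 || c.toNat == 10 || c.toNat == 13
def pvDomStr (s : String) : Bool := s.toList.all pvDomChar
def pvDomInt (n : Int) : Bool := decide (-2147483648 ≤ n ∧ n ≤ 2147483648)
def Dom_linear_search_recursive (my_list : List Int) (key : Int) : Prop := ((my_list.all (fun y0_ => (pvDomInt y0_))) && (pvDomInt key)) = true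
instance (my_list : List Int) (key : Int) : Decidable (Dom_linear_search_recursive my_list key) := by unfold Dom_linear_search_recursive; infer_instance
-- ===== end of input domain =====

-- B replaces A's back-to-front slice recursion by one forward pass keeping the last matching index (simpler, no list copies).

-- ===== PORT A =====
-- A recurses from the end: checks the last element, else recurses on my_list[:-1] (= dropLast).
def linear_search_recursive (my_list : List Int) (key : Int) : Int :=
  let s : Int := (my_list.length : Int) - 1
  if s < 0 then -1
  else if (PySem.List.pyGetD my_list s 0) = key then s
  else linear_search_recursive my_list.dropLast key
termination_by my_list.length
decreasing_by
  simp only [List.length_dropLast]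
  omega

-- ===== PORT B =====
-- forward enumerate loop with a last-match accumulator
def linear_search_recursive_alt (my_list : List Int) (key : Int) : Int :=
  (PySem.List.enumerate my_list).foldl
    (fun result p => if p.2 = key then p.1 else result) (-1)

-- ===== PRECONDITION & SPEC =====
def Spec_linear_search_recursive (my_list : List Int) (key : Int) (out : Int) : Prop := out = linear_search_recursive_alt my_list key
instance (my_list : List Int) (key : Int) (out : Int) : Decidable (Spec_linear_search_recursive my_list key out) := by unfold Spec_linear_search_recursive; infer_instance

-- ===== CLAIM (what is proved, stated in full; the proofs are below) =====
def Claim_equal_linear_search_recursive : Prop := ∀ (my_list : List Int) (key : Int), Dom_linear_search_recursive my_list key → Spec_linear_search_recursive my_list key (linear_search_recursive my_list key)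

-- ===== LEMMAS AND PROOFS =====

theorem alt_concat (l : List Int) (x key : Int) :
    linear_search_recursive_alt (l ++ [x]) key =
      if x = key then (l.length : Int) else linear_search_recursive_alt l key := by
  simp [linear_search_recursive_alt, PySem.List.enumerate_append, PySem.List.enumerate, List.foldl_append]

theorem a_eq_alt (l : List Int) (key : Int) :
    linear_search_recursive l key = linear_search_recursive_alt l key := by
  induction l using List.reverseRecOn with
  | nil => simp [linear_search_recursive, linear_search_recursive_alt, PySem.List.enumerate]
  | append_singleton l x ih =>
      rw [alt_concat]
      rw [linear_search_recursive]
      have hlen : ((l ++ [x]).length : Int) - 1 = (l.length : Int) := by simp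
      have hget : PySem.List.pyGetD (l ++ [x]) ((l.length : Int)) 0 = x := by
        simp [PySem.List.pyGetD, PySem.List.pyGet?, PySem.List.pyIdx?]
      simp only [hlen]
      have hnn : ¬ ((l.length : Int) < 0) := by omega
      rw [if_neg hnn, hget]
      by_cases h : x = key
      · simp [h]
      · simp [h, ih]

-- ===== VERDICT (by name: the statement is the Claim_ definition above) =====
theorem linear_search_recursive_spec : Claim_equal_linear_search_recursive := by
  intro l key _
  unfold Spec_linear_search_recursive
  exact a_eq_alt l key
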